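-- pv_equiv track=rewrite | github.com/reisarthur/sudoku-solver | sudoku.py | contains_all_numbers
-- ===== SOURCE A (Python) =====
-- def contains_all_numbers(arr):
--     if len(arr) != 9:
--         return False
--     if not all(1 <= num <= 9 for num in arr):
--         return False
--     if len(set(arr)) != 9:
--         return False
--     return True
-- ===== SOURCE B (Python) =====
-- def contains_all_numbers(arr):
--     return len(arr) == 9 and sorted(arr) == list(range(1, 10))
-- ===== Notes on version B (the rewrite author's own statement) =====
-- stated objective: idiomatic
-- what changed: Replaces A's three separate scans (length guard, range-bound all(), set-dedup size) with a single permutation test: sort the array once and compare it to list(range(1, 10)).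
import Mathlib
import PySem

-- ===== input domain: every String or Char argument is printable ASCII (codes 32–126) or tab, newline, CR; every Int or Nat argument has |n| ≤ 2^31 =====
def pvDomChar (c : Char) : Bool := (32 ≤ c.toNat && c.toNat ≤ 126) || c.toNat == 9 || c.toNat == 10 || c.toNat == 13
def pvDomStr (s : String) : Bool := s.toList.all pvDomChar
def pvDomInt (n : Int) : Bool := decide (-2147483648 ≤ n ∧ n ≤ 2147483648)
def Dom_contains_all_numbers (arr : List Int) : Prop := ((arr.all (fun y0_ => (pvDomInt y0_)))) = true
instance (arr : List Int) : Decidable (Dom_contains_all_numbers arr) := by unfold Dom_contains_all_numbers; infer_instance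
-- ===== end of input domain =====

-- B replaces A's three separate scans (length, range-bound all(), set-dedup size) with one
-- sort-and-compare permutation test; objective: idiomatic.

-- ===== PORT A =====
def contains_all_numbers (arr : List Int) : Bool :=
  if arr.length ≠ 9 then false
  else if !(arr.all (fun num => decide (1 ≤ num) && decide (num ≤ 9))) then false
  else if (PySem.Set.ofList arr).length ≠ 9 then false
  else true

-- ===== PORT B =====
def contains_all_numbers_alt (arr : List Int) : Bool :=
  arr.length == 9 && (PySem.List.sorted arr (fun x => x) false == PySem.List.pyRange 1 10 1)

-- ===== PRECONDITION & SPEC =====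
def Spec_contains_all_numbers (arr : List Int) (out : Bool) : Prop := out = contains_all_numbers_alt arr
instance (arr : List Int) (out : Bool) : Decidable (Spec_contains_all_numbers arr out) := by unfold Spec_contains_all_numbers; infer_instance

-- ===== CLAIM (what is proved, stated in full; the proofs are below) =====
def Claim_equal_contains_all_numbers : Prop := ∀ (arr : List Int), Dom_contains_all_numbers arr → Spec_contains_all_numbers arr (contains_all_numbers arr)

-- ===== LEMMAS AND PROOFS =====

lemma pvRange_eq : PySem.List.pyRange 1 10 1 = ([1,2,3,4,5,6,7,8,9] : List Int) := by decide

lemma pvNodup_of_setlen (arr : List Int)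
    (h : (PySem.Set.ofList arr).length = arr.length) : arr.Nodup := by
  have hperm : (PySem.Set.ofList arr).Perm arr.dedup := by
    refine (List.perm_ext_iff_of_nodup (PySem.Set.nodup_ofList arr) arr.nodup_dedup).2 ?_
    intro x
    rw [PySem.Set.mem_ofList, List.mem_dedup]
  have hlen : arr.dedup.length = arr.length := by
    rw [← hperm.length_eq, h]
  have : arr.dedup = arr := (List.dedup_sublist arr).eq_of_length hlen
  rw [← this]
  exact arr.nodup_dedup

lemma pvKey (arr : List Int) (hl : arr.length = 9) :
    ((∀ x ∈ arr, 1 ≤ x ∧ x ≤ 9) ∧ (PySem.Set.ofList arr).length = 9) ↔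
      PySem.List.sorted arr (fun x => x) false = ([1,2,3,4,5,6,7,8,9] : List Int) := by
  constructor
  · rintro ⟨hrange, hset⟩
    have hnd : arr.Nodup := pvNodup_of_setlen arr (by rw [hset, hl])
    have hsub : arr ⊆ ([1,2,3,4,5,6,7,8,9] : List Int) := by
      intro x hx
      have := hrange x hx
      simp only [List.mem_cons, List.not_mem_nil, or_false]
      omega
    have hsp : List.Subperm arr ([1,2,3,4,5,6,7,8,9] : List Int) := hnd.subperm hsub
    obtain ⟨l, hlp, hls⟩ := hsp
    have hleq : l = ([1,2,3,4,5,6,7,8,9] : List Int) :=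
      hls.eq_of_length (by rw [hlp.length_eq, hl]; decide)
    have hperm : ([1,2,3,4,5,6,7,8,9] : List Int).Perm arr := by
      rw [← hleq]; exact hlp
    exact PySem.List.sorted_eq_of_perm_of_pairwise_lt arr _ _ hperm (by decide)
  · intro hs
    have hperm : ([1,2,3,4,5,6,7,8,9] : List Int).Perm arr := by
      rw [← hs]; exact PySem.List.sorted_perm arr _ _
    have hnd : arr.Nodup := hperm.nodup (by decide)
    refine ⟨?_, ?_⟩
    · intro x hx
      have : x ∈ ([1,2,3,4,5,6,7,8,9] : List Int) := hperm.mem_iff.2 hx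
      simp only [List.mem_cons, List.not_mem_nil, or_false] at this
      omega
    · rw [PySem.Set.ofList_eq_self_of_nodup arr hnd, hl]

-- ===== VERDICT (by name: the statement is the Claim_ definition above) =====
theorem contains_all_numbers_spec : Claim_equal_contains_all_numbers := by
  intro arr _
  unfold Spec_contains_all_numbers contains_all_numbers contains_all_numbers_alt
  by_cases hl : arr.length = 9
  · rw [if_neg (by simp [hl]), pvRange_eq, Bool.eq_iff_iff]
    constructor
    · intro h
      split_ifs at h with h1 h2
      · push Not at h2
        rw [Bool.not_eq_true', Bool.not_eq_false, List.all_eq_true] at h1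
        have hall : ∀ x ∈ arr, 1 ≤ x ∧ x ≤ 9 := by
          intro x hx
          have := h1 x hx
          simp only [Bool.and_eq_true, decide_eq_true_eq] at this
          exact this
        simp [hl, (pvKey arr hl).1 ⟨hall, h2⟩]
    · intro h
      simp only [Bool.and_eq_true, beq_iff_eq] at h
      obtain ⟨hrange, hset⟩ := (pvKey arr hl).2 h.2
      rw [if_neg, if_neg]
      · simp [hset]
      · simp only [Bool.not_eq_true', Bool.not_eq_false, List.all_eq_true]
        intro x hx
        have := hrange x hx
        simp only [Bool.and_eq_true, decide_eq_true_eq]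
        exact this
  · rw [if_pos (by simpa using hl)]
    simp [hl]
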